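-- pv_equiv track=rewrite | github.com/TIMHX/DSC-20---Prgrmng-DataStruc-for-Data-Sc---Archive | Lab/lab05/lab05.py | dollar_amount
-- ===== SOURCE A (Python) =====
-- def dollar_amount(string):
--     """Return total for the dollar amounts
--     >>> dollar_amount("I have $5 dollars. I want to buy 2 toys for my kid")
--     5
--     >>> dollar_amount("My name is Marina. I am 20 years old")
--     0
--     >>> dollar_amount("Life is tough. Today I made $-100.")
--     0
--     >>> dollar_amount("I found $5 and $20 in my pocket.")
--     25
--     >>> dollar_amount("I had $10 and $100 plus $1000")
--     1110
--     """
--     out = ['0']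
--     for i in range(len(string) - 1):
--         if string[i + 1].isdigit():
--             if string[i] != '$':
--                 continue
--             else:
--                 out.append(string[i + 1])
--                 for x in range(i + 2, len(string)):
--                     if string[x].isdigit():
--                         out[-1] = out[-1] + string[x]
--                     else:
--                         break
--     out = list(map(lambda x: int(x), out))
--     return sum(out)
-- ===== SOURCE B (Python) =====
-- def dollar_amount(string):
--     """Single-pass state machine: accumulate the digit run that starts right
--     after a '$' and add each completed run's int value to a running total."""
--     total = 0
--     run = ''
--     prev = ''
--     for ch in string:
--         if ch.isdigit() and (run != '' or prev == '$'):
--             run += ch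
--         else:
--             if run != '':
--                 total += int(run)
--             run = ''
--         prev = ch
--     return total + (int(run) if run != '' else 0)
-- ===== Notes on version B (the rewrite author's own statement) =====
-- stated objective: faster
-- what changed: Replaces A's index loop with an inner re-scanning digit loop and a list of strings that is mapped to ints and summed at the end by a single left-to-right character-level state machine (running total, current digit run, previous char) that adds each completed run as it ends.
import Mathlib
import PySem

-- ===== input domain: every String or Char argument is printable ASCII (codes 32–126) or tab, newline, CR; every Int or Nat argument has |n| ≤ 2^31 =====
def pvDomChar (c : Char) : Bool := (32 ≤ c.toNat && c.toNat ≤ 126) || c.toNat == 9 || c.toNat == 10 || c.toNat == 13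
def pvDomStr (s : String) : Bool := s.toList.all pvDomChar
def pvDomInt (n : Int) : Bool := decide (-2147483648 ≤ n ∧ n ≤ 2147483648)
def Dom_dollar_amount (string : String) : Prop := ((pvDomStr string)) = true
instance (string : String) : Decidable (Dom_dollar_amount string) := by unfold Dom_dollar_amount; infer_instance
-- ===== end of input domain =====

-- B replaces A's index scan + inner digit loop + end-of-loop map/sum by one
-- character-level state-machine pass (objective: faster, constant factor).

-- ===== PORT A =====
-- inner loop 'for x in range(i + 2, len(string)): … else: break', extending the
-- last collected string (strings are List Char per the PySem convention)
def dollarInner (cs : List Char) (x : Nat) (acc : List Char) : List Char :=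
  if _h : x < cs.length then
    if PySem.Chars.isdigit (cs.getD x ' ') then
      dollarInner cs (x + 1) (acc ++ [cs.getD x ' '])
    else acc
  else acc
  termination_by cs.length - x

def dollar_amount (string : String) : Int :=
  let cs := string.toList
  let out : List (List Char) :=
    (PySem.List.pyRange 0 ((cs.length : Int) - 1) 1).foldl
      (fun out i =>
        if PySem.Chars.isdigit (PySem.List.pyGetD cs (i + 1) ' ') then
          if PySem.List.pyGetD cs i ' ' ≠ '$' then out
          else out ++ [dollarInner cs (i + 2).toNat [PySem.List.pyGetD cs (i + 1) ' ']]
        else out)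
      [['0']]
  -- int(x): every collected x is "0" or a nonempty digit string, so int never raises
  (out.map (fun x => (PySem.Int.ofChars? x).getD 0)).sum

-- ===== PORT B =====
-- state = (total, run, prev); one step of the 'for ch in string' loop of Source B
def dollarStep (st : Int × List Char × List Char) (ch : Char) :
    Int × List Char × List Char :=
  if PySem.Chars.isdigit ch && (!st.2.1.isEmpty || st.2.2 == ['$']) then
    (st.1, st.2.1 ++ [ch], [ch])
  else if st.2.1.isEmpty then (st.1, [], [ch])
  else (st.1 + (PySem.Int.ofChars? st.2.1).getD 0, [], [ch])

def dollar_amount_alt (string : String) : Int :=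
  let fin := string.toList.foldl dollarStep (0, [], [])
  fin.1 + (if fin.2.1.isEmpty then 0 else (PySem.Int.ofChars? fin.2.1).getD 0)

-- ===== PRECONDITION & SPEC =====
def Spec_dollar_amount (string : String) (out : Int) : Prop := out = dollar_amount_alt string
instance (string : String) (out : Int) : Decidable (Spec_dollar_amount string out) := by unfold Spec_dollar_amount; infer_instance

-- ===== CLAIM (what is proved, stated in full; the proofs are below) =====
def Claim_equal_dollar_amount : Prop := ∀ (string : String), Dom_dollar_amount string → Spec_dollar_amount string (dollar_amount string)

-- ===== LEMMAS AND PROOFS =====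

-- value of one collected token, int(x)
def tokVal (x : List Char) : Int := (PySem.Int.ofChars? x).getD 0

-- sum of the values of a list of tokens
def tokSum (L : List (List Char)) : Int := (L.map tokVal).sum

-- does the list start with a digit?
def digStart : List Char → Bool
  | [] => false
  | d :: _ => PySem.Chars.isdigit d

-- the maximal digit runs that immediately follow a '$'
def dRuns : List Char → List (List Char)
  | [] => []
  | c :: rest =>
      (if c == '$' && digStart rest then [rest.takeWhile PySem.Chars.isdigit] else [])
        ++ dRuns rest

-- runs contributed by the rest of the input when no run is pending and the
-- previous character was '$' iff pd
def wRuns (pd : Bool) (l : List Char) : List (List Char) :=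
  if pd && digStart l then l.takeWhile PySem.Chars.isdigit :: dRuns l else dRuns l

-- B's final answer read off from a loop state
def bFin (st : Int × List Char × List Char) : Int :=
  st.1 + (if st.2.1.isEmpty then 0 else (PySem.Int.ofChars? st.2.1).getD 0)

lemma isdigit_ne_dollar {c : Char} (h : PySem.Chars.isdigit c = true) :
    (c == '$') = false := by
  by_cases hc : c = '$'
  · subst hc; simp [PySem.Chars.isdigit] at h
  · exact beq_eq_false_iff_ne.mpr hc

lemma beq_singleton (c : Char) : (([c] : List Char) == ['$']) = (c == '$') := by
  by_cases hc : c = '$'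
  · subst hc; simp
  · have h1 : (([c] : List Char) == ['$']) = false :=
      beq_eq_false_iff_ne.mpr (by simp [hc])
    rw [h1, beq_eq_false_iff_ne.mpr hc]

lemma dRuns_dropWhile (l : List Char) :
    dRuns (l.dropWhile PySem.Chars.isdigit) = dRuns l := by
  induction l with
  | nil => rfl
  | cons c t ih =>
    by_cases h : PySem.Chars.isdigit c = true
    · rw [List.dropWhile_cons_of_pos h, ih]
      simp [dRuns, isdigit_ne_dollar h]
    · rw [List.dropWhile_cons_of_neg h]

lemma dollarInner_eq (cs : List Char) (x : Nat) (acc : List Char) :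
    dollarInner cs x acc = acc ++ (cs.drop x).takeWhile PySem.Chars.isdigit := by
  induction hn : cs.length - x using Nat.strong_induction_on generalizing x acc with
  | _ n ih =>
    rw [dollarInner]
    by_cases h : x < cs.length
    · have hd : cs.drop x = cs.getD x ' ' :: cs.drop (x + 1) := by
        rw [List.getD_eq_getElem cs ' ' h]
        exact (List.drop_eq_getElem_cons h)
      by_cases hdig : PySem.Chars.isdigit (cs.getD x ' ') = true
      · rw [dif_pos h, if_pos hdig]
        rw [ih (cs.length - (x + 1)) (by omega) (x + 1) _ rfl]
        rw [hd, List.takeWhile_cons_of_pos hdig, List.append_assoc]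
        rfl
      · rw [dif_pos h, if_neg hdig]
        rw [hd, List.takeWhile_cons_of_neg hdig]
        simp
    · rw [dif_neg h]
      rw [List.drop_of_length_le (by omega)]
      simp

-- the contribution of outer-loop index k, as a list of collected tokens
def gIdx (cs : List Char) (k : Nat) : List (List Char) :=
  if PySem.Chars.isdigit (cs.getD (k + 1) ' ') = true ∧ cs.getD k ' ' = '$' then
    [dollarInner cs (k + 2) [cs.getD (k + 1) ' ']]
  else []

lemma gIdx_succ (c : Char) (t : List Char) (k : Nat) :
    gIdx (c :: t) (k + 1) = gIdx t k := by
  simp only [gIdx, List.getD_cons_succ, dollarInner_eq, List.drop_succ_cons]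

lemma flatMap_range_gIdx (cs : List Char) :
    (List.range (cs.length - 1)).flatMap (gIdx cs) = dRuns cs := by
  induction cs with
  | nil => rfl
  | cons c t ih =>
    cases t with
    | nil => simp [dRuns, digStart]
    | cons b t' =>
      have hlen : (c :: b :: t').length - 1 = (b :: t').length - 1 + 1 := by
        simp
      rw [hlen, List.range_succ_eq_map, List.flatMap_cons, List.flatMap_map]
      have hsh : (fun a => gIdx (c :: b :: t') a.succ) = gIdx (b :: t') :=
        funext fun k => gIdx_succ c (b :: t') k
      rw [hsh, ih]
      have hdrop2 : (c :: b :: t').drop 2 = t' := rfl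
      by_cases hd : PySem.Chars.isdigit b = true
      · by_cases hc : c = '$'
        · subst hc
          simp [gIdx, dRuns, digStart, hd, dollarInner_eq, hdrop2,
                List.takeWhile_cons_of_pos hd]
        · simp [gIdx, dRuns, digStart, hd, hc, beq_eq_false_iff_ne.mpr hc]
      · simp [gIdx, dRuns, digStart, hd]

lemma A_fold_eq (cs : List Char) :
    (((PySem.List.pyRange 0 ((cs.length : Int) - 1) 1).foldl
        (fun (out : List (List Char)) (i : Int) =>
          if PySem.Chars.isdigit (PySem.List.pyGetD cs (i + 1) ' ') then
            if PySem.List.pyGetD cs i ' ' ≠ '$' then out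
            else out ++ [dollarInner cs (i + 2).toNat [PySem.List.pyGetD cs (i + 1) ' ']]
          else out)
        [['0']]).map (fun x => (PySem.Int.ofChars? x).getD 0)).sum
      = tokSum (dRuns cs) := by
  rw [PySem.List.pyRange_one, List.foldl_map]
  have hstep : ∀ (out : List (List Char)) (k : Nat),
      (if PySem.Chars.isdigit (PySem.List.pyGetD cs (0 + (k : Int) + 1) ' ') = true then
        if PySem.List.pyGetD cs (0 + (k : Int)) ' ' ≠ '$' then out
        else out ++ [dollarInner cs (0 + (k : Int) + 2).toNat
                      [PySem.List.pyGetD cs (0 + (k : Int) + 1) ' ']]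
      else out)
      = out ++ gIdx cs k := by
    intro out k
    have e0 : (0 : Int) + (k : Int) = ((k : Nat) : Int) := by ring
    have e1 : ((k : Nat) : Int) + 1 = ((k + 1 : Nat) : Int) := by omega
    have e2 : (((k : Nat) : Int) + 2).toNat = k + 2 := by omega
    simp only [e0]
    simp only [e1, e2, PySem.List.pyGetD_natCast]
    by_cases h1 : PySem.Chars.isdigit (cs[k + 1]?.getD ' ') = true
    · by_cases h2 : cs[k]?.getD ' ' = '$'
      · simp [gIdx, h1, h2]
      · simp [gIdx, h1, h2]
    · simp [gIdx, h1]
  have hfold : ∀ (L : List Nat) (out : List (List Char)),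
      L.foldl (fun (x : List (List Char)) (y : Nat) =>
        if PySem.Chars.isdigit (PySem.List.pyGetD cs (0 + (y : Int) + 1) ' ') = true then
          if PySem.List.pyGetD cs (0 + (y : Int)) ' ' ≠ '$' then x
          else x ++ [dollarInner cs (0 + (y : Int) + 2).toNat
                      [PySem.List.pyGetD cs (0 + (y : Int) + 1) ' ']]
        else x) out
      = out ++ L.flatMap (gIdx cs) := by
    intro L
    induction L with
    | nil => intro out; simp
    | cons k L ihL =>
      intro out
      rw [List.foldl_cons, hstep out k, ihL, List.flatMap_cons, List.append_assoc]
  rw [hfold]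
  have hn : (((cs.length : Int) - 1 - 0).toNat) = cs.length - 1 := by omega
  rw [hn, flatMap_range_gIdx cs]
  have h0 : (PySem.Int.ofChars? ['0']).getD 0 = 0 := by decide
  have hcons : ([['0']] : List (List Char)) ++ dRuns cs = ['0'] :: dRuns cs := rfl
  rw [hcons, List.map_cons, List.sum_cons, h0, zero_add]
  rfl

lemma dollar_amount_eq_tokSum (s : String) :
    dollar_amount s = tokSum (dRuns s.toList) :=
  A_fold_eq s.toList

-- joint loop invariant for B: no pending run (left) / pending run r (right)
lemma bLoop_invariant (l : List Char) :
    (∀ (t : Int) (p : List Char),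
      bFin (l.foldl dollarStep (t, [], p)) = t + tokSum (wRuns (p == ['$']) l)) ∧
    (∀ (t : Int) (r p : List Char), r ≠ [] →
      bFin (l.foldl dollarStep (t, r, p))
        = t + tokVal (r ++ l.takeWhile PySem.Chars.isdigit)
            + tokSum (dRuns (l.dropWhile PySem.Chars.isdigit))) := by
  induction l with
  | nil =>
    constructor
    · intro t p
      simp [bFin, wRuns, digStart, dRuns, tokSum]
    · intro t r p hr
      have hre : r.isEmpty = false := by
        cases r with
        | nil => exact absurd rfl hr
        | cons a b => rfl
      simp [bFin, hre, tokSum, tokVal, dRuns]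
  | cons c l ih =>
    obtain ⟨ihN, ihP⟩ := ih
    constructor
    · -- no pending run
      intro t p
      by_cases hd : PySem.Chars.isdigit c = true
      · by_cases hp : (p == ['$']) = true
        · -- a run starts at c
          have hstep : dollarStep (t, [], p) c = (t, [c], [c]) := by
            simp [dollarStep, hd, hp]
          rw [List.foldl_cons, hstep, ihP t [c] [c] (by simp)]
          have hw : wRuns true (c :: l)
              = (c :: l.takeWhile PySem.Chars.isdigit) :: dRuns l := by
            simp [wRuns, digStart, hd, dRuns, isdigit_ne_dollar hd,
                  List.takeWhile_cons_of_pos hd]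
          rw [hp, hw, ← dRuns_dropWhile l]
          simp [tokSum]
          ring
        · -- digit, but the previous character was not '$'
          have hstep : dollarStep (t, [], p) c = (t, [], [c]) := by
            simp [dollarStep, hd, hp]
          rw [List.foldl_cons, hstep, ihN t [c], beq_singleton,
              isdigit_ne_dollar hd]
          simp [wRuns, hp, dRuns, isdigit_ne_dollar hd]
      · -- non-digit: the state only records the new previous character
        have hstep : dollarStep (t, [], p) c = (t, [], [c]) := by
          simp [dollarStep, hd]
        rw [List.foldl_cons, hstep, ihN t [c], beq_singleton]
        have hds : digStart (c :: l) = false := by simp [digStart, hd]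
        by_cases hcd : (c == '$' && digStart l) = true
        · simp [wRuns, dRuns, hcd, hds, tokSum]
        · simp only [Bool.not_eq_true] at hcd
          simp [wRuns, dRuns, hcd, hds, tokSum]
    · -- a pending run r
      intro t r p hr
      have hre : r.isEmpty = false := by
        cases r with
        | nil => exact absurd rfl hr
        | cons a b => rfl
      by_cases hd : PySem.Chars.isdigit c = true
      · -- the run is extended
        have hstep : dollarStep (t, r, p) c = (t, r ++ [c], [c]) := by
          simp [dollarStep, hd, hre]
        rw [List.foldl_cons, hstep, ihP t (r ++ [c]) [c] (by simp)]
        rw [List.takeWhile_cons_of_pos hd, List.dropWhile_cons_of_pos hd]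
        simp [List.append_assoc]
      · -- the run ends: its value is added to the total
        have hstep : dollarStep (t, r, p) c
            = (t + (PySem.Int.ofChars? r).getD 0, [], [c]) := by
          simp [dollarStep, hd, hre]
        rw [List.foldl_cons, hstep, ihN _ [c], beq_singleton]
        rw [List.takeWhile_cons_of_neg hd, List.dropWhile_cons_of_neg hd]
        by_cases hcd : (c == '$' && digStart l) = true
        · simp [wRuns, dRuns, hcd, tokSum, tokVal]
        · simp only [Bool.not_eq_true] at hcd
          simp [wRuns, dRuns, hcd, tokSum, tokVal]

lemma dollar_amount_alt_eq_tokSum (s : String) :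
    dollar_amount_alt s = tokSum (dRuns s.toList) := by
  have h := (bLoop_invariant s.toList).1 0 []
  have hb : (([] : List Char) == ['$']) = false := rfl
  rw [hb] at h
  have hw : wRuns false s.toList = dRuns s.toList := by simp [wRuns]
  rw [hw] at h
  simpa [dollar_amount_alt, bFin] using h

-- ===== VERDICT (by name: the statement is the Claim_ definition above) =====
theorem dollar_amount_spec : Claim_equal_dollar_amount := by
  intro s _
  unfold Spec_dollar_amount
  rw [dollar_amount_eq_tokSum, dollar_amount_alt_eq_tokSum]
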